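-- pv_equiv track=rewrite | github.com/tomorrowdevs-projects/programming-basics | projects/m2/018-text-messaging/solutions/PiervitoRinaldi/text-messaging.py | text_messaging
-- ===== SOURCE A (Python) =====
-- def text_messaging(text):
--     text = text.upper()
--     letters_keys = {
--         '1': ['.', ',', '?', '!', ':'],
--         '2': ['A', 'B', 'C'],
--         '3': ['D', 'E', 'F'],
--         '4': ['G', 'H', 'I'],
--         '5': ['J', 'K', 'L'],
--         '6': ['M', 'N', 'O'],
--         '7': ['P', 'Q', 'R', 'S'],
--         '8': ['T', 'U', 'V'],
--         '9': ['W', 'X', 'Y' ,'Z'],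
--         '0': [' ']
--         }
--
--     result = ''
--     for letter in text:
--         for k in letters_keys:
--             if letter in letters_keys[k] :
--                 letter_index = letters_keys[k].index(letter)
--                 # Multiply the key by its index, turning the first index into 1
--                 result += k * (letter_index + 1)
--     return result
-- ===== SOURCE B (Python) =====
-- def presses(ch):
--     """Key presses for one (already uppercased) character, computed arithmetically."""
--     if 'A' <= ch <= 'Z':
--         o = ord(ch) - ord('A')
--         if o < 15:            # A..O: groups of 3 on keys 2..6
--             key, rep = 2 + o // 3, o % 3 + 1
--         elif o < 19:          # PQRS on key 7
--             key, rep = 7, o - 14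
--         elif o < 22:          # TUV on key 8
--             key, rep = 8, o - 18
--         else:                 # WXYZ on key 9
--             key, rep = 9, o - 21
--         return str(key) * rep
--     if ch == ' ':
--         return '0'
--     i = '.,?!:'.find(ch)
--     if i >= 0:
--         return '1' * (i + 1)
--     return ''
--
--
-- def text_messaging(text):
--     return ''.join(presses(ch) for ch in text.upper())
-- ===== Notes on version B (the rewrite author's own statement) =====
-- stated objective: faster
-- what changed: A scans the whole key->letters table and re-finds each letter with .index for every character; B keeps no letters table at all and computes key and press count arithmetically from the character code (alphabet offset with group-of-3 division, special cases for the 4-letter keys 7 and 9, for space and for the 5 punctuation marks).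
import Mathlib
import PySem

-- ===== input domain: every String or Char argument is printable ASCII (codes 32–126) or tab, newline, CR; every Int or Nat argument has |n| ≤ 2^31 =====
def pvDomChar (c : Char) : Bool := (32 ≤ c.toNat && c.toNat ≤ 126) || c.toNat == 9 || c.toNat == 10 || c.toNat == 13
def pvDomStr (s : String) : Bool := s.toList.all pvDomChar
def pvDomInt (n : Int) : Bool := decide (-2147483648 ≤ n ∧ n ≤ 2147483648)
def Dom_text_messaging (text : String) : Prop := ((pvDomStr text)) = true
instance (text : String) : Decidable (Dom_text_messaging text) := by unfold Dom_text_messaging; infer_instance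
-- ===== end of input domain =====

-- B replaces A's per-character scan of the key->letters table (with .index) by a closed-form
-- arithmetic computation of key and repetition from the character code (alternative algorithm).


-- ===== PORT A =====
-- A's key -> letters table, in dict insertion order
def tmKeys : List (Char × List Char) :=
  [('1', ['.', ',', '?', '!', ':']), ('2', ['A', 'B', 'C']), ('3', ['D', 'E', 'F']),
   ('4', ['G', 'H', 'I']), ('5', ['J', 'K', 'L']), ('6', ['M', 'N', 'O']),
   ('7', ['P', 'Q', 'R', 'S']), ('8', ['T', 'U', 'V']), ('9', ['W', 'X', 'Y', 'Z']),
   ('0', [' '])]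

def text_messaging (text : String) : String :=
  let t := (PySem.Str.upper text).toList
  String.mk (t.foldl (fun result letter =>
    tmKeys.foldl (fun result kv =>
      if kv.2.contains letter then
        result ++ PySem.List.pyRepeat [kv.1]
          (((PySem.List.index? kv.2 letter).getD 0 : Int) + 1)
      else result) result) [])

-- ===== PORT B =====
-- Source B's helper presses(ch): the key presses for one uppercased character, arithmetically
def tmPress (c : Char) : List Char :=
  if 'A' ≤ c ∧ c ≤ 'Z' then
    let o : Int := (c.toNat : Int) - 65
    let kr : Int × Int :=
      if o < 15 then (2 + PySem.Int.floordiv o 3, PySem.Int.mod o 3 + 1)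
      else if o < 19 then (7, o - 14)
      else if o < 22 then (8, o - 18)
      else (9, o - 21)
    PySem.List.pyRepeat (PySem.Int.toStr kr.1).toList kr.2
  else if c = ' ' then ['0']
  else
    let i := PySem.Chars.find ".,?!:".toList [c]   -- '.,?!:'.find(ch)
    if 0 ≤ i then PySem.List.pyRepeat ['1'] (i + 1) else []

def text_messaging_alt (text : String) : String :=
  String.mk (PySem.Chars.join [] (((PySem.Str.upper text).toList).map tmPress))

-- ===== PRECONDITION & SPEC =====
def Spec_text_messaging (text : String) (out : String) : Prop := out = text_messaging_alt text
instance (text : String) (out : String) : Decidable (Spec_text_messaging text out) := by unfold Spec_text_messaging; infer_instance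

-- ===== CLAIM (what is proved, stated in full; the proofs are below) =====
def Claim_equal_text_messaging : Prop := ∀ (text : String), Dom_text_messaging text → Spec_text_messaging text (text_messaging text)

-- ===== LEMMAS AND PROOFS =====

-- all characters the keypad maps
def tmChars : List Char :=
  ['.', ',', '?', '!', ':', 'A', 'B', 'C', 'D', 'E', 'F', 'G', 'H', 'I', 'J', 'K', 'L',
   'M', 'N', 'O', 'P', 'Q', 'R', 'S', 'T', 'U', 'V', 'W', 'X', 'Y', 'Z', ' ']

-- what A contributes for one character, written as a flatMap over the key table
def tmEncA (c : Char) : List Char :=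
  tmKeys.flatMap (fun kv =>
    if kv.2.contains c then
      PySem.List.pyRepeat [kv.1] (((PySem.List.index? kv.2 c).getD 0 : Int) + 1)
    else [])

-- distinct characters have distinct codes
theorem tmToNat_ne (c d : Char) (h : c ≠ d) : c.toNat ≠ d.toNat :=
  fun hn => h (Char.ext (UInt32.toNat_inj.mp hn))

-- per-character agreement between the two ports
theorem tmEnc_eq (c : Char) : tmEncA c = tmPress c := by
  by_cases h : c ∈ tmChars
  · fin_cases h <;> decide
  · simp only [tmChars, List.mem_cons, List.not_mem_nil, or_false, not_or] at h
    obtain ⟨h1,h2,h3,h4,h5,h6,h7,h8,h9,h10,h11,h12,h13,h14,h15,h16,h17,h18,h19,h20,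
      h21,h22,h23,h24,h25,h26,h27,h28,h29,h30,h31,h32⟩ := h
    have hl : ¬ ('A' ≤ c ∧ c ≤ 'Z') := by
      rintro ⟨ha, hb⟩
      rw [Char.le_def, UInt32.le_iff_toNat_le] at ha hb
      have ha' : 65 ≤ c.toNat := ha
      have hb' : c.toNat ≤ 90 := hb
      have n6 : c.toNat ≠ 65 := tmToNat_ne c 'A' h6
      have n7 : c.toNat ≠ 66 := tmToNat_ne c 'B' h7
      have n8 : c.toNat ≠ 67 := tmToNat_ne c 'C' h8
      have n9 : c.toNat ≠ 68 := tmToNat_ne c 'D' h9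
      have n10 : c.toNat ≠ 69 := tmToNat_ne c 'E' h10
      have n11 : c.toNat ≠ 70 := tmToNat_ne c 'F' h11
      have n12 : c.toNat ≠ 71 := tmToNat_ne c 'G' h12
      have n13 : c.toNat ≠ 72 := tmToNat_ne c 'H' h13
      have n14 : c.toNat ≠ 73 := tmToNat_ne c 'I' h14
      have n15 : c.toNat ≠ 74 := tmToNat_ne c 'J' h15
      have n16 : c.toNat ≠ 75 := tmToNat_ne c 'K' h16
      have n17 : c.toNat ≠ 76 := tmToNat_ne c 'L' h17
      have n18 : c.toNat ≠ 77 := tmToNat_ne c 'M' h18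
      have n19 : c.toNat ≠ 78 := tmToNat_ne c 'N' h19
      have n20 : c.toNat ≠ 79 := tmToNat_ne c 'O' h20
      have n21 : c.toNat ≠ 80 := tmToNat_ne c 'P' h21
      have n22 : c.toNat ≠ 81 := tmToNat_ne c 'Q' h22
      have n23 : c.toNat ≠ 82 := tmToNat_ne c 'R' h23
      have n24 : c.toNat ≠ 83 := tmToNat_ne c 'S' h24
      have n25 : c.toNat ≠ 84 := tmToNat_ne c 'T' h25
      have n26 : c.toNat ≠ 85 := tmToNat_ne c 'U' h26
      have n27 : c.toNat ≠ 86 := tmToNat_ne c 'V' h27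
      have n28 : c.toNat ≠ 87 := tmToNat_ne c 'W' h28
      have n29 : c.toNat ≠ 88 := tmToNat_ne c 'X' h29
      have n30 : c.toNat ≠ 89 := tmToNat_ne c 'Y' h30
      have n31 : c.toNat ≠ 90 := tmToNat_ne c 'Z' h31
      omega
    have hfind : PySem.Chars.find ".,?!:".toList [c] = -1 := by
      rw [PySem.Chars.find_eq_neg_one_iff]
      intro hin
      have := hin.mem (List.mem_singleton_self c)
      simp at this
      rcases this with h|h|h|h|h <;> simp_all
    have hA : tmEncA c = [] := by
      simp only [tmEncA, tmKeys, List.flatMap_cons, List.flatMap_nil, List.contains_cons,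
        List.contains_nil]
      simp [h1,h2,h3,h4,h5,h6,h7,h8,h9,h10,h11,h12,h13,h14,h15,h16,h17,h18,h19,h20,h21,h22,
        h23,h24,h25,h26,h27,h28,h29,h30,h31,h32]
    rw [hA]
    simp only [tmPress, hl, if_false, h32, if_false, hfind]
    norm_num

-- A's inner loop over the key table appends exactly tmEncA c
theorem tmInner_eq (c : Char) (r : List Char) :
    tmKeys.foldl (fun result kv =>
      if kv.2.contains c then
        result ++ PySem.List.pyRepeat [kv.1]
          (((PySem.List.index? kv.2 c).getD 0 : Int) + 1)
      else result) r = r ++ tmEncA c := by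
  rw [tmEncA, ← PySem.List.foldl_append_eq_flatMap]
  apply PySem.List.foldl_congr_mem
  intro acc kv _
  by_cases h : c ∈ kv.2 <;> simp [h]

-- ''.join with empty separator is flatten
theorem tmJoin_empty (l : List (List Char)) : PySem.Chars.join [] l = l.flatten := by
  induction l with
  | nil => simp [PySem.Chars.join_nil]
  | cons a t ih =>
    cases t with
    | nil => simp [PySem.Chars.join_singleton]
    | cons b r => rw [PySem.Chars.join_cons_cons]; simp [ih]

-- ===== VERDICT (by name: the statement is the Claim_ definition above) =====
theorem text_messaging_spec : Claim_equal_text_messaging := by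
  intro text _
  unfold Spec_text_messaging text_messaging text_messaging_alt
  simp only [tmInner_eq]
  rw [PySem.List.foldl_append_eq_flatMap, tmJoin_empty]
  simp only [← List.flatMap_def, List.nil_append, funext tmEnc_eq]
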